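-- pv_equiv track=rewrite | github.com/minonath/gugu | gu/system/png.py | un_interlace
-- ===== SOURCE A (Python) =====
-- import itertools
--
-- adam7sub1 = (
--     0, 5, 3, 5, 1, 5, 3, 5,
--     6, 6, 6, 6, 6, 6, 6, 6,
--     4, 5, 4, 5, 4, 5, 4, 5,
--     6, 6, 6, 6, 6, 6, 6, 6,
--     2, 5, 3, 5, 2, 5, 3, 5,
--     6, 6, 6, 6, 6, 6, 6, 6,
--     4, 5, 4, 5, 4, 5, 4, 5,
--     6, 6, 6, 6, 6, 6, 6, 6,
-- )
--
-- def un_interlace(un_filter_images, width, height, pixel_bytes):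
--     # 下面方法，把每个图片的所有行当成一个一纬数组来看待，也就有 7 个数组
--     reduced = tuple(itertools.chain(*m) for m in un_filter_images)
--
--     for h in range(height):
--         h_1 = (h % 8) << 3  # 偏移量
--         for w in range(width):
--             image_order = adam7sub1[h_1 + w % 8]  # 当前图像的编号
--             current = reduced[image_order]  # 切换数组
--
--             for _ in range(pixel_bytes):  # 从数组里提取多个字节
--                 yield next(current)
-- ===== SOURCE B (Python) =====
-- # Stateless re-implementation: instead of consuming 7 chained iterators in
-- # Adam7 pattern order, compute for every output pixel its pass and the exact
-- # byte offset inside that pass's flattened sub-image, and slice it out directly.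
--
-- # (x offset, y offset, x stride, y stride) of the seven Adam7 passes
-- ADAM7_PASSES = ((0, 0, 8, 8), (4, 0, 8, 8), (0, 4, 4, 8), (2, 0, 4, 4),
--                 (0, 2, 2, 4), (1, 0, 2, 2), (0, 1, 1, 2))
--
--
-- def _pass_of(h, w):
--     """Adam7 pass number owning pixel (h, w)."""
--     if h % 2:
--         return 6
--     if w % 2:
--         return 5
--     if h % 4:
--         return 4
--     if w % 4:
--         return 3
--     if h % 8:
--         return 2
--     if w % 8:
--         return 1
--     return 0
--
--
-- def un_interlace(un_filter_images, width, height, pixel_bytes):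
--     nb = max(pixel_bytes, 0)  # bytes per pixel; a non-positive size yields nothing
--     flats = [[b for row in m for b in row] for m in un_filter_images]
--     for h in range(height):
--         for w in range(width):
--             k = _pass_of(h, w)
--             x0, y0, dx, dy = ADAM7_PASSES[k]
--             row_len = (width - x0 + dx - 1) // dx
--             base = (((h - y0) // dy) * row_len + (w - x0) // dx) * nb
--             yield from flats[k][base:base + nb]
-- ===== Notes on version B (the rewrite author's own statement) =====
-- stated objective: alternative
-- what changed: A streams bytes by consuming seven chained sub-image iterators in Adam7 pattern order; B is stateless: for every output pixel it computes its pass and exact byte offset inside that pass's flattened sub-image in closed form and slices the bytes out directly.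
import Mathlib
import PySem

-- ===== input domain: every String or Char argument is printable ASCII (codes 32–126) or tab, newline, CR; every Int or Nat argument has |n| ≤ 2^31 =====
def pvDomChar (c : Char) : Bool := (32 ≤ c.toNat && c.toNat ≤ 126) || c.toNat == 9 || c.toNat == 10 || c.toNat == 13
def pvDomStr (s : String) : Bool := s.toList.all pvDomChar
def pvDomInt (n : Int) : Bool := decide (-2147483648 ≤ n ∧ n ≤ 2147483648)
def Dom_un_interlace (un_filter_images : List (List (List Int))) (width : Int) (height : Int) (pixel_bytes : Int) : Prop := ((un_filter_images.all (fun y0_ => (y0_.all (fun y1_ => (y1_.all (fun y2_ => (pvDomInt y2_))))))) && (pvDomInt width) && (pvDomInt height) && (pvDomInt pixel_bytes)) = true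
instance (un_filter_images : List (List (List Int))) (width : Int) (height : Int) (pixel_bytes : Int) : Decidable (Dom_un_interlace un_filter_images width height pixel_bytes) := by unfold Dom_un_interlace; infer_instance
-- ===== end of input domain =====

-- B replaces A's stateful consumption of seven chained iterators by closed-form
-- Adam7 offset arithmetic with direct slicing (objective: alternative, not faster).

-- ===== PORT A =====
def adam7sub1 : List Int :=
  [0,5,3,5,1,5,3,5, 6,6,6,6,6,6,6,6, 4,5,4,5,4,5,4,5, 6,6,6,6,6,6,6,6,
   2,5,3,5,2,5,3,5, 6,6,6,6,6,6,6,6, 4,5,4,5,4,5,4,5, 6,6,6,6,6,6,6,6]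

-- body of A's inner loop: pick the pass from the table, pop pixel_bytes bytes from its iterator
def pvStepA (pixel_bytes h1 : Int) (st : List (List Int) × List Int) (w : Int) :
    List (List Int) × List Int :=
  let k := (PySem.List.pyGetD adam7sub1 (h1 + PySem.Int.mod w 8) 0).toNat
  let cur := st.1.getD k []
  (st.1.set k (cur.drop pixel_bytes.toNat), st.2 ++ cur.take pixel_bytes.toNat)

-- body of A's outer loop ((h % 8) << 3 is (h % 8) * 8)
def pvRowA (width pixel_bytes : Int) (st : List (List Int) × List Int) (h : Int) :
    List (List Int) × List Int :=
  (PySem.List.pyRange 0 width 1).foldl (pvStepA pixel_bytes (PySem.Int.mod h 8 * 8)) st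

def un_interlace (un_filter_images : List (List (List Int))) (width : Int) (height : Int) (pixel_bytes : Int) : List Int :=
  ((PySem.List.pyRange 0 height 1).foldl (pvRowA width pixel_bytes)
    (un_filter_images.map List.flatten, [])).2

-- ===== PORT B =====
-- ADAM7_PASSES of Source B
def pvParams : List (Int × Int × Int × Int) :=
  [(0,0,8,8),(4,0,8,8),(0,4,4,8),(2,0,4,4),(0,2,2,4),(1,0,2,2),(0,1,1,2)]

-- _pass_of of Source B
def pvPassOf (h w : Int) : Nat :=
  if PySem.Int.mod h 2 ≠ 0 then 6 else if PySem.Int.mod w 2 ≠ 0 then 5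
  else if PySem.Int.mod h 4 ≠ 0 then 4 else if PySem.Int.mod w 4 ≠ 0 then 3
  else if PySem.Int.mod h 8 ≠ 0 then 2 else if PySem.Int.mod w 8 ≠ 0 then 1 else 0

def un_interlace_alt (un_filter_images : List (List (List Int))) (width : Int) (height : Int) (pixel_bytes : Int) : List Int :=
  let nb := max pixel_bytes 0
  let flats := un_filter_images.map List.flatten
  (PySem.List.pyRange 0 height 1).flatMap (fun h =>
    (PySem.List.pyRange 0 width 1).flatMap (fun w =>
      let k := pvPassOf h w
      let p := pvParams.getD k (0, 0, 1, 1)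
      let rowLen := PySem.Int.floordiv (width - p.1 + p.2.2.1 - 1) p.2.2.1
      let base := (PySem.Int.floordiv (h - p.2.1) p.2.2.2 * rowLen +
                   PySem.Int.floordiv (w - p.1) p.2.2.1) * nb
      PySem.List.slice (flats.getD k []) (some base) (some (base + nb))))

-- ===== PRECONDITION & SPEC =====
-- Adam7 pass geometry (x-offset, y-offset, x-stride, y-stride), duplicated in
-- closed form so that Pre_ does not reach the ports.
def pvX0 : Nat → Int | 0 => 0 | 1 => 4 | 2 => 0 | 3 => 2 | 4 => 0 | 5 => 1 | 6 => 0 | _ => 0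
def pvY0 : Nat → Int | 0 => 0 | 1 => 0 | 2 => 4 | 3 => 0 | 4 => 2 | 5 => 0 | 6 => 1 | _ => 0
def pvDX : Nat → Int | 0 => 8 | 1 => 8 | 2 => 4 | 3 => 4 | 4 => 2 | 5 => 2 | 6 => 1 | _ => 1
def pvDY : Nat → Int | 0 => 8 | 1 => 8 | 2 => 8 | 3 => 4 | 4 => 4 | 5 => 2 | 6 => 2 | _ => 2

-- number of integers in [0, n) congruent to x0 modulo d (for 0 ≤ x0 < d)
def pvCount (x0 d n : Int) : Int := if n ≤ x0 then 0 else (n - x0 + d - 1) / d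

-- Pre_: exactly the inputs on which the Python A returns normally: every Adam7
-- pass that actually occurs in a width×height image must have its sub-image
-- present (else IndexError) and long enough (else next() exhausts the chain,
-- RuntimeError via PEP 479).
def Pre_un_interlace (un_filter_images : List (List (List Int))) (width : Int) (height : Int) (pixel_bytes : Int) : Prop :=
  ∀ k : Nat, k < 7 →
    0 < pvCount (pvY0 k) (pvDY k) height * pvCount (pvX0 k) (pvDX k) width →
    (k < un_filter_images.length ∧
      pvCount (pvY0 k) (pvDY k) height * pvCount (pvX0 k) (pvDX k) width * pixel_bytes
        ≤ ((un_filter_images.getD k []).flatten.length : Int))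

instance (un_filter_images : List (List (List Int))) (width : Int) (height : Int) (pixel_bytes : Int) : Decidable (Pre_un_interlace un_filter_images width height pixel_bytes) := by
  unfold Pre_un_interlace; infer_instance

def pvWitness_un_interlace : List (List (List Int)) × Int × Int × Int :=
  ([[[10]], [[]], [[]], [[]], [[]], [[11]], [[12, 13]]], 2, 2, 1)

def Spec_un_interlace (un_filter_images : List (List (List Int))) (width : Int) (height : Int) (pixel_bytes : Int) (out : List Int) : Prop := out = un_interlace_alt un_filter_images width height pixel_bytes
instance (un_filter_images : List (List (List Int))) (width : Int) (height : Int) (pixel_bytes : Int) (out : List Int) : Decidable (Spec_un_interlace un_filter_images width height pixel_bytes out) := by unfold Spec_un_interlace; infer_instance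

-- ===== CLAIM (what is proved, stated in full; the proofs are below) =====
def Claim_equal_un_interlace : Prop := ∀ (un_filter_images : List (List (List Int))) (width : Int) (height : Int) (pixel_bytes : Int), Dom_un_interlace un_filter_images width height pixel_bytes → Pre_un_interlace un_filter_images width height pixel_bytes → Spec_un_interlace un_filter_images width height pixel_bytes (un_interlace un_filter_images width height pixel_bytes)

-- ===== LEMMAS AND PROOFS =====

-- the pass owning pixel (h, w), written over `%` (= emod)
def passOf (h w : Int) : Nat :=
  if h % 2 ≠ 0 then 6 else if w % 2 ≠ 0 then 5 else if h % 4 ≠ 0 then 4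
  else if w % 4 ≠ 0 then 3 else if h % 8 ≠ 0 then 2 else if w % 8 ≠ 0 then 1 else 0

-- pixels of pass j already consumed inside row h, before column w
def inRow (j : Nat) (h w : Int) : Int :=
  if h % pvDY j = pvY0 j then pvCount (pvX0 j) (pvDX j) w else 0

-- pixels of pass j consumed after rows [0,h) and columns [0,w) of row h
def cMid (width h w : Int) (j : Nat) : Int :=
  pvCount (pvY0 j) (pvDY j) h * pvCount (pvX0 j) (pvDX j) width + inRow j h w

-- closed-form index of pixel (h,w) inside its own pass
def idxI (width h w : Int) : Int :=
  (h - pvY0 (passOf h w)) / pvDY (passOf h w) *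
    pvCount (pvX0 (passOf h w)) (pvDX (passOf h w)) width +
  (w - pvX0 (passOf h w)) / pvDX (passOf h w)

-- the bytes of pixel (h,w)
def chunk (flats : List (List Int)) (width pb h w : Int) : List Int :=
  ((flats.getD (passOf h w) []).drop ((idxI width h w).toNat * pb.toNat)).take pb.toNat

-- A's iterator state after consuming c j pixels from each pass j
def stCnt (flats : List (List Int)) (pb : Int) (c : Nat → Int) : List (List Int) :=
  flats.mapIdx (fun j l => if j < 7 then l.drop ((c j).toNat * pb.toNat) else l)

lemma flatMap_congr {α β : Type} (l : List α) (f g : α → List β)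
    (h : ∀ x ∈ l, f x = g x) : l.flatMap f = l.flatMap g := by
  simp only [List.flatMap]; rw [List.map_congr_left h]

lemma passOf_lt (h w : Int) : passOf h w < 7 := by
  unfold passOf; split_ifs <;> omega

lemma pvPassOf_eq (h w : Int) : pvPassOf h w = passOf h w := by
  unfold pvPassOf passOf
  simp only [PySem.Int.mod_eq_emod_of_pos (show (0:Int) < 2 by norm_num),
             PySem.Int.mod_eq_emod_of_pos (show (0:Int) < 4 by norm_num),
             PySem.Int.mod_eq_emod_of_pos (show (0:Int) < 8 by norm_num)]

lemma pyRange_succ (W : Nat) :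
    PySem.List.pyRange 0 ((W + 1 : Nat) : Int) 1 =
      PySem.List.pyRange 0 (W : Int) 1 ++ [(W : Int)] := by
  rw [show ((W + 1 : Nat) : Int) = (W : Int) + 1 by push_cast; ring]
  exact PySem.List.pyRange_one_succ_right (Int.natCast_nonneg W)

lemma pyRange_toNat (b : Int) :
    PySem.List.pyRange 0 b 1 = PySem.List.pyRange 0 (b.toNat : Int) 1 := by
  by_cases hb : b ≤ 0
  · rw [PySem.List.pyRange_one_eq_nil hb, PySem.List.pyRange_one_eq_nil (by omega)]
  · congr 1; omega

lemma l_bridge : ∀ a b : Int, 0 ≤ a → a < 8 → 0 ≤ b → b < 8 →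
    (PySem.List.pyGetD adam7sub1 (a * 8 + b) 0).toNat =
      (if a % 2 ≠ 0 then 6 else if b % 2 ≠ 0 then 5 else if a % 4 ≠ 0 then 4
       else if b % 4 ≠ 0 then 3 else if a % 8 ≠ 0 then 2 else if b % 8 ≠ 0 then 1 else 0) := by
  intro a b ha1 ha2 hb1 hb2
  interval_cases a <;> interval_cases b <;> decide

lemma l_table (h w : Int) (hh : 0 ≤ h) (hw : 0 ≤ w) :
    (PySem.List.pyGetD adam7sub1 (PySem.Int.mod h 8 * 8 + PySem.Int.mod w 8) 0).toNat
      = passOf h w := by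
  simp only [PySem.Int.mod_eq_emod_of_pos (show (0:Int) < 8 by norm_num)]
  rw [l_bridge (h % 8) (w % 8) (Int.emod_nonneg _ (by norm_num)) (Int.emod_lt_of_pos _ (by norm_num))
      (Int.emod_nonneg _ (by norm_num)) (Int.emod_lt_of_pos _ (by norm_num))]
  unfold passOf
  rw [Int.emod_emod_of_dvd h (by norm_num : (2:Int) ∣ 8), Int.emod_emod_of_dvd h (by norm_num : (4:Int) ∣ 8),
      Int.emod_emod_of_dvd h (by norm_num : (8:Int) ∣ 8), Int.emod_emod_of_dvd w (by norm_num : (2:Int) ∣ 8),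
      Int.emod_emod_of_dvd w (by norm_num : (4:Int) ∣ 8), Int.emod_emod_of_dvd w (by norm_num : (8:Int) ∣ 8)]

lemma passOf_spec (h w : Int) (hh : 0 ≤ h) (hw : 0 ≤ w) :
    h % pvDY (passOf h w) = pvY0 (passOf h w) ∧ w % pvDX (passOf h w) = pvX0 (passOf h w) := by
  unfold passOf
  split_ifs <;> refine ⟨?_, ?_⟩ <;> norm_num [pvDX, pvDY, pvX0, pvY0] <;> omega

lemma pvX0_nonneg (j : Nat) : 0 ≤ pvX0 j := by
  rcases j with _|_|_|_|_|_|_|j <;> first | decide | exact le_refl _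

lemma pvY0_nonneg (j : Nat) : 0 ≤ pvY0 j := by
  rcases j with _|_|_|_|_|_|_|j <;> first | decide | exact le_refl _

lemma pvCount_zero (x0 d : Int) (hx : 0 ≤ x0) : pvCount x0 d 0 = 0 := by
  unfold pvCount; rw [if_pos hx]

lemma pvCount_succ_row (j : Nat) (hj : j < 7) (h : Int) (hh : 0 ≤ h) :
    pvCount (pvY0 j) (pvDY j) (h + 1)
      = pvCount (pvY0 j) (pvDY j) h + (if h % pvDY j = pvY0 j then 1 else 0) := by
  interval_cases j <;>
    (simp only [pvCount, pvY0, pvDY] at *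
     split_ifs <;> omega)

lemma pvCount_toNat (j : Nat) (hj : j < 7) (n : Int) :
    pvCount (pvX0 j) (pvDX j) ((n.toNat : Nat) : Int) = pvCount (pvX0 j) (pvDX j) n := by
  interval_cases j <;>
    (simp only [pvCount, pvX0, pvDX]
     split_ifs <;> omega)

lemma pvCount_eq_formula (k : Nat) (hk : k < 7) (width w : Int) (hw0 : 0 ≤ w)
    (hww : w < width) (hx : w % pvDX k = pvX0 k) :
    (width - pvX0 k + pvDX k - 1) / pvDX k = pvCount (pvX0 k) (pvDX k) width := by
  interval_cases k <;>
    (simp only [pvCount, pvX0, pvDX] at hx ⊢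
     split_ifs <;> omega)

lemma floordiv_dx (k : Nat) (hk : k < 7) (a : Int) :
    PySem.Int.floordiv a (pvDX k) = a / pvDX k := by
  interval_cases k <;> exact PySem.Int.floordiv_eq_ediv_of_pos (by decide)

lemma floordiv_dy (k : Nat) (hk : k < 7) (a : Int) :
    PySem.Int.floordiv a (pvDY k) = a / pvDY k := by
  interval_cases k <;> exact PySem.Int.floordiv_eq_ediv_of_pos (by decide)

lemma key (width h w : Int) (hh : 0 ≤ h) (hw : 0 ≤ w) :
    cMid width h w (passOf h w) = idxI width h w
    ∧ 0 ≤ idxI width h w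
    ∧ cMid width h (w + 1) (passOf h w) = cMid width h w (passOf h w) + 1
    ∧ (∀ j, j < 7 → j ≠ passOf h w → cMid width h (w + 1) j = cMid width h w j) := by
  obtain ⟨hy, hx⟩ := passOf_spec h w hh hw
  have hk := passOf_lt h w
  unfold idxI cMid inRow
  generalize hP : passOf h w = k at hy hx hk ⊢
  interval_cases k <;>
    · simp only [pvCount, pvX0, pvY0, pvDX, pvDY] at hy hx ⊢
      refine ⟨?_, ?_, ?_, ?_⟩
      · congr 1
        · congr 1 <;> first | rfl | (split_ifs <;> omega)
        · split_ifs <;> omega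
      · refine add_nonneg (mul_nonneg ?_ ?_) ?_
        · omega
        · split_ifs <;> omega
        · omega
      · rw [add_assoc]
        congr 1
        split_ifs <;> omega
      · intro j hj hne
        interval_cases j <;>
          first
          | exact absurd rfl hne
          | (simp only [pvX0, pvY0, pvDX, pvDY]
             congr 1
             split_ifs <;> omega)

lemma rowEnd (width h : Int) (hh : 0 ≤ h) :
    ∀ j, j < 7 → cMid width h ((width.toNat : Nat) : Int) j = cMid width (h + 1) 0 j := by
  intro j hj
  unfold cMid inRow
  rw [pvCount_toNat j hj width, pvCount_succ_row j hj h hh,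
      pvCount_zero _ _ (pvX0_nonneg j)]
  simp only [ite_self]
  by_cases hit : h % pvDY j = pvY0 j
  · rw [if_pos hit, if_pos hit]; ring
  · rw [if_neg hit, if_neg hit]; ring

lemma cMid_zero (width : Int) (j : Nat) (hj : j < 7) : cMid width 0 0 j = 0 := by
  unfold cMid inRow
  rw [pvCount_zero _ _ (pvY0_nonneg j), pvCount_zero _ _ (pvX0_nonneg j)]
  simp

lemma stCnt_getD (flats : List (List Int)) (pb : Int) (c : Nat → Int) (k : Nat) (hk : k < 7) :
    (stCnt flats pb c).getD k [] = (flats.getD k []).drop ((c k).toNat * pb.toNat) := by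
  unfold stCnt
  rcases lt_or_ge k flats.length with hlen | hlen
  · simp [List.getD_eq_getElem?_getD, List.getElem?_mapIdx, List.getElem?_eq_getElem hlen, hk]
  · simp [List.getD_eq_getElem?_getD, List.getElem?_eq_none_iff.mpr, hlen,
      List.getElem?_eq_none (by simpa using hlen : flats.length ≤ k)]

lemma stCnt_set (flats : List (List Int)) (pb : Int) (c : Nat → Int) (k : Nat)
    (hk : k < 7) (hck : 0 ≤ c k) :
    (stCnt flats pb c).set k (((flats.getD k []).drop ((c k).toNat * pb.toNat)).drop pb.toNat)
      = stCnt flats pb (fun j => if j = k then c j + 1 else c j) := by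
  unfold stCnt
  apply List.ext_getElem?
  intro i
  rw [List.getElem?_set]
  by_cases hik : k = i
  · subst hik
    simp only [List.length_mapIdx, List.getElem?_mapIdx]
    by_cases hlen : k < flats.length
    · rw [if_pos hlen]
      rw [List.getElem?_eq_getElem hlen]
      simp only [Option.map_some, if_pos hk]
      congr 2
      · rw [List.getD_eq_getElem?_getD, List.getElem?_eq_getElem hlen]
        simp [List.drop_drop]
        congr 1
        have h1 : (c k + 1).toNat = (c k).toNat + 1 := by omega
        rw [h1]; ring
    · rw [if_neg hlen]
      rw [List.getElem?_eq_none (by omega)]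
      simp
  · rw [if_neg hik]
    simp only [List.getElem?_mapIdx]
    cases flats[i]? <;> simp [Ne.symm hik]

lemma stCnt_congr (flats : List (List Int)) (pb : Int) (c c' : Nat → Int)
    (hcc : ∀ j, j < 7 → c j = c' j) : stCnt flats pb c = stCnt flats pb c' := by
  unfold stCnt
  apply List.ext_getElem?
  intro i
  simp only [List.getElem?_mapIdx]
  cases flats[i]? with
  | none => rfl
  | some l =>
    by_cases hi : i < 7
    · simp [hi, hcc i hi]
    · simp [hi]

lemma stCnt_zero (flats : List (List Int)) (pb : Int) (c : Nat → Int)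
    (hc : ∀ j, j < 7 → c j = 0) : stCnt flats pb c = flats := by
  unfold stCnt
  apply List.ext_getElem?
  intro i
  simp only [List.getElem?_mapIdx]
  cases hfi : flats[i]? with
  | none => rfl
  | some l =>
    by_cases hi : i < 7
    · simp [hi, hc i hi]
    · simp [hi]

lemma slice_chunk (l : List Int) (I pb : Int) (hI : 0 ≤ I) :
    PySem.List.slice l (some (I * max pb 0)) (some (I * max pb 0 + max pb 0))
      = (l.drop (I.toNat * pb.toNat)).take pb.toNat := by
  have hnb : (0:Int) ≤ max pb 0 := le_max_right _ _
  have hA : (0:Int) ≤ I * max pb 0 := mul_nonneg hI hnb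
  rw [PySem.List.slice_toNat l hA (add_nonneg hA hnb)]
  have e1 : (I * max pb 0).toNat = I.toNat * pb.toNat := by
    rcases le_total pb 0 with hp | hp
    · rw [max_eq_right hp, mul_zero]
      have h2 : pb.toNat = 0 := by omega
      simp [h2]
    · rw [max_eq_left hp]
      have h3 : ((I.toNat * pb.toNat : Nat) : Int) = I * pb := by
        push_cast [Int.toNat_of_nonneg hI, Int.toNat_of_nonneg hp]; ring
      rw [← h3, Int.toNat_natCast]
  have e2 : (I * max pb 0 + max pb 0).toNat - (I * max pb 0).toNat = pb.toNat := by
    generalize hA' : (I * max pb 0) = A at hA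
    rcases le_total pb 0 with hp | hp
    · rw [max_eq_right hp]; omega
    · rw [max_eq_left hp]; omega
  rw [e2, e1]

lemma stepA_eq (flats : List (List Int)) (width pb h w : Int) (out : List Int)
    (hh : 0 ≤ h) (hw : 0 ≤ w) :
    pvStepA pb (PySem.Int.mod h 8 * 8) (stCnt flats pb (cMid width h w), out) w
      = (stCnt flats pb (cMid width h (w + 1)), out ++ chunk flats width pb h w) := by
  obtain ⟨eIdx, hIdx, hSucc, hKeep⟩ := key width h w hh hw
  have hk := passOf_lt h w
  have hck : 0 ≤ cMid width h w (passOf h w) := by rw [eIdx]; exact hIdx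
  simp only [pvStepA]
  rw [l_table h w hh hw]
  rw [stCnt_getD flats pb (cMid width h w) (passOf h w) hk]
  refine Prod.ext ?_ ?_
  · show (stCnt flats pb (cMid width h w)).set (passOf h w) _ = _
    rw [stCnt_set flats pb (cMid width h w) (passOf h w) hk hck]
    refine stCnt_congr _ _ _ _ (fun j hj => ?_)
    by_cases hje : j = passOf h w
    · subst hje; rw [if_pos rfl]; exact hSucc.symm
    · rw [if_neg hje]; exact (hKeep j hj hje).symm
  · show out ++ _ = out ++ chunk flats width pb h w
    unfold chunk
    rw [← eIdx]

lemma innerAux (flats : List (List Int)) (width pb h : Int) (hh : 0 ≤ h) :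
    ∀ (W : Nat) (out : List Int),
      (PySem.List.pyRange 0 (W : Int) 1).foldl (pvStepA pb (PySem.Int.mod h 8 * 8))
          (stCnt flats pb (cMid width h 0), out)
        = (stCnt flats pb (cMid width h (W : Int)),
            out ++ (PySem.List.pyRange 0 (W : Int) 1).flatMap (chunk flats width pb h)) := by
  intro W
  induction W with
  | zero =>
    intro out
    simp [PySem.List.pyRange_one_eq_nil (le_refl (0:Int))]
  | succ W ih =>
    intro out
    rw [pyRange_succ W, List.foldl_append, ih out, List.flatMap_append]
    simp only [List.foldl_cons, List.foldl_nil, List.flatMap_cons, List.flatMap_nil,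
      List.append_nil]
    rw [stepA_eq flats width pb h (W : Int) _ hh (Int.natCast_nonneg W)]
    rw [show ((W + 1 : Nat) : Int) = (W : Int) + 1 by push_cast; ring]
    rw [List.append_assoc]

lemma rowA_eq (flats : List (List Int)) (width pb h : Int) (out : List Int) (hh : 0 ≤ h) :
    pvRowA width pb (stCnt flats pb (cMid width h 0), out) h
      = (stCnt flats pb (cMid width (h + 1) 0),
          out ++ (PySem.List.pyRange 0 width 1).flatMap (chunk flats width pb h)) := by
  unfold pvRowA
  rw [pyRange_toNat width]
  rw [innerAux flats width pb h hh width.toNat out]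
  refine Prod.ext ?_ ?_
  · exact stCnt_congr _ _ _ _ (rowEnd width h hh)
  · show out ++ _ = out ++ _
    rw [← pyRange_toNat width]

lemma outerAux (flats : List (List Int)) (width pb : Int) :
    ∀ (H : Nat) (out : List Int),
      (PySem.List.pyRange 0 (H : Int) 1).foldl (pvRowA width pb)
          (stCnt flats pb (cMid width 0 0), out)
        = (stCnt flats pb (cMid width (H : Int) 0),
            out ++ (PySem.List.pyRange 0 (H : Int) 1).flatMap (fun hr =>
              (PySem.List.pyRange 0 width 1).flatMap (chunk flats width pb hr))) := by
  intro H
  induction H with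
  | zero =>
    intro out
    simp [PySem.List.pyRange_one_eq_nil (le_refl (0:Int))]
  | succ H ih =>
    intro out
    rw [pyRange_succ H, List.foldl_append, ih out, List.flatMap_append]
    simp only [List.foldl_cons, List.foldl_nil, List.flatMap_cons, List.flatMap_nil,
      List.append_nil]
    rw [rowA_eq flats width pb (H : Int) _ (Int.natCast_nonneg H)]
    rw [show ((H + 1 : Nat) : Int) = (H : Int) + 1 by push_cast; ring]
    rw [List.append_assoc]

lemma alt_char (un_filter_images : List (List (List Int))) (width height pb : Int) :
    un_interlace_alt un_filter_images width height pb
      = (PySem.List.pyRange 0 height 1).flatMap (fun h =>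
          (PySem.List.pyRange 0 width 1).flatMap
            (chunk (un_filter_images.map List.flatten) width pb h)) := by
  unfold un_interlace_alt
  apply flatMap_congr
  intro h hmem
  apply flatMap_congr
  intro w hwmem
  obtain ⟨hh, hht⟩ := (PySem.List.mem_pyRange_one).mp hmem
  obtain ⟨hw0, hww⟩ := (PySem.List.mem_pyRange_one).mp hwmem
  simp only [pvPassOf_eq]
  obtain ⟨hy, hx⟩ := passOf_spec h w hh hw0
  have hk := passOf_lt h w
  have hidx := (key width h w hh hw0).2.1
  unfold chunk
  unfold idxI at hidx ⊢
  generalize hP : passOf h w = k at hy hx hk hidx ⊢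
  have hparams : pvParams.getD k (0, 0, 1, 1) = (pvX0 k, pvY0 k, pvDX k, pvDY k) := by
    interval_cases k <;> rfl
  rw [hparams]
  simp only
  rw [floordiv_dx k hk, floordiv_dx k hk, floordiv_dy k hk]
  rw [pvCount_eq_formula k hk width w hw0 hww hx]
  exact slice_chunk _ _ _ hidx

lemma main_eq (un_filter_images : List (List (List Int))) (width height pb : Int) :
    un_interlace un_filter_images width height pb
      = un_interlace_alt un_filter_images width height pb := by
  unfold un_interlace
  rw [pyRange_toNat height]
  rw [show (un_filter_images.map List.flatten)
        = stCnt (un_filter_images.map List.flatten) pb (cMid width 0 0) from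
      (stCnt_zero _ _ _ (fun j hj => cMid_zero width j hj)).symm]
  rw [outerAux (un_filter_images.map List.flatten) width pb height.toNat []]
  rw [alt_char, pyRange_toNat height]
  simp

-- ===== VERDICT (by name: the statement is the Claim_ definition above) =====
theorem un_interlace_spec : Claim_equal_un_interlace := by
  intro imgs width height pb _ _
  unfold Spec_un_interlace
  exact main_eq imgs width height pb
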